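-- pv_equiv track=rewrite | github.com/miliar/Code_Jam_Webscraper | Solutions_python/Problem_188/301.py | number_of_seq
-- ===== SOURCE A (Python) =====
-- def fact(n):
-- 	if n == 0:
-- 		return 1
-- 	res = n
-- 	n -= 1
-- 	while n > 0:
-- 		res *= n
-- 		n -= 1
-- 	return res
--
-- def number_of_seq(n):
-- 	result = 0
-- 	for i in range(n+1):
-- 		if i == 0:
-- 			result += 1
-- 		else:
-- 			result += fact(n)//fact(n-i)
-- 	return result
-- ===== SOURCE B (Python) =====
-- def number_of_seq(n):
--     total, term = 0, 1
--     for i in range(n + 1):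
--         total += term
--         term *= n - i
--     return total
-- ===== Notes on version B (the rewrite author's own statement) =====
-- stated objective: faster
-- what changed: Replaces the per-term factorial recomputation fact(n)//fact(n-i) with a single pass that maintains a running falling-factorial product (term *= n-i) while accumulating the sum.
import Mathlib
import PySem

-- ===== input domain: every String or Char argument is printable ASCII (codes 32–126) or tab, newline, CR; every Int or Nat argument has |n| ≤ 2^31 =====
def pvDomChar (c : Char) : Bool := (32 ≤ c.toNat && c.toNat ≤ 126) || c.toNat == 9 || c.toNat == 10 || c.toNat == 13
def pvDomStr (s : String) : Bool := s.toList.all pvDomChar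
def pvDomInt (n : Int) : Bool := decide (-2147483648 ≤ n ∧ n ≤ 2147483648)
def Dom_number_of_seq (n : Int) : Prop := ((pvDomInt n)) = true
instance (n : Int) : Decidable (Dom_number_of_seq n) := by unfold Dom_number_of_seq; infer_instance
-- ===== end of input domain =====

-- B replaces A's per-term factorial quotients by one pass with a running falling-factorial product (faster, O(n) vs O(n^2) multiplications).

-- ===== PORT A =====
-- the 'while n > 0: res *= n; n -= 1' loop of fact
def pvFactLoop (res n : Int) : Int :=
  if 0 < n then pvFactLoop (res * n) (n - 1) else res
termination_by n.toNat
decreasing_by omega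

def pvFact (n : Int) : Int :=
  if n = 0 then 1 else pvFactLoop n (n - 1)

def number_of_seq (n : Int) : Int :=
  (PySem.List.pyRange 0 (n + 1) 1).foldl
    (fun result i =>
      if i = 0 then result + 1
      else result + PySem.Int.floordiv (pvFact n) (pvFact (n - i))) 0

-- ===== PORT B =====
def number_of_seq_alt (n : Int) : Int :=
  ((PySem.List.pyRange 0 (n + 1) 1).foldl
    (fun (st : Int × Int) i => (st.1 + st.2, st.2 * (n - i))) (0, 1)).1

-- ===== PRECONDITION & SPEC =====
def Spec_number_of_seq (n : Int) (out : Int) : Prop := out = number_of_seq_alt n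
instance (n : Int) (out : Int) : Decidable (Spec_number_of_seq n out) := by unfold Spec_number_of_seq; infer_instance

-- ===== CLAIM (what is proved, stated in full; the proofs are below) =====
def Claim_equal_number_of_seq : Prop := ∀ (n : Int), Dom_number_of_seq n → Spec_number_of_seq n (number_of_seq n)

-- ===== LEMMAS AND PROOFS =====

-- n! on the Nat side, as an Int
def pvNfac : Nat → Int
  | 0 => 1
  | k + 1 => pvNfac k * ((k : Int) + 1)

-- falling factorial n·(n-1)···(n-k+1)
def pvPprod (n : Int) : Nat → Int
  | 0 => 1
  | k + 1 => pvPprod n k * (n - (k : Int))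

-- partial sums Σ_{j<k} pvPprod n j
def pvSsum (n : Int) : Nat → Int
  | 0 => 0
  | k + 1 => pvSsum n k + pvPprod n k

theorem pvFactLoop_spec (m : Nat) : ∀ (res : Int), pvFactLoop res (m : Int) = res * pvNfac m := by
  induction m with
  | zero => intro res; rw [pvFactLoop]; simp [pvNfac]
  | succ k ih =>
      intro res
      rw [pvFactLoop]
      have h : (0 : Int) < ((k + 1 : Nat) : Int) := by push_cast; omega
      rw [if_pos h]
      have h2 : ((k + 1 : Nat) : Int) - 1 = (k : Int) := by push_cast; ring
      rw [h2, ih]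
      simp [pvNfac]; ring

theorem pvFact_natCast (m : Nat) : pvFact (m : Int) = pvNfac m := by
  cases m with
  | zero => simp [pvFact, pvNfac]
  | succ k =>
      have hne : ((k + 1 : Nat) : Int) ≠ 0 := by push_cast; omega
      have h2 : ((k + 1 : Nat) : Int) - 1 = (k : Int) := by push_cast; ring
      rw [pvFact, if_neg hne, h2, pvFactLoop_spec]
      simp [pvNfac]; ring

theorem pvNfac_pos (m : Nat) : 0 < pvNfac m := by
  induction m with
  | zero => simp [pvNfac]
  | succ k ih => have : (0:Int) < (k:Int) + 1 := by positivity
                 simpa [pvNfac] using mul_pos ih this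

-- n! = (n·(n-1)···(n-j+1)) · (n-j)!  for 0 ≤ j ≤ n
theorem pvFact_split (j : Nat) : ∀ (n : Int), (j : Int) ≤ n →
    pvNfac n.toNat = pvPprod n j * pvNfac (n - (j : Int)).toNat := by
  induction j with
  | zero => intro n hn; simp [pvPprod]
  | succ k ih =>
      intro n hn
      have hk : (k : Int) ≤ n := by push_cast at hn ⊢; omega
      have h1 : (n - (k : Int)).toNat = (n - ((k : Int) + 1)).toNat + 1 := by
        push_cast at hn; omega
      have h2 : (((n - ((k : Int) + 1)).toNat : Int)) + 1 = n - (k : Int) := by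
        push_cast at hn; omega
      rw [ih n hk, h1]
      simp only [pvNfac, pvPprod]
      rw [h2]
      push_cast
      ring

theorem pv_div_term (n i : Int) (h0 : 1 ≤ i) (h1 : i ≤ n) :
    PySem.Int.floordiv (pvFact n) (pvFact (n - i)) = pvPprod n i.toNat := by
  have hn : 0 ≤ n := by omega
  have hni : 0 ≤ n - i := by omega
  have hcast : ((i.toNat : Int)) = i := Int.toNat_of_nonneg (by omega)
  have hfn : pvFact n = pvNfac n.toNat := by
    conv_lhs => rw [← Int.toNat_of_nonneg hn]
    exact pvFact_natCast n.toNat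
  have hfni : pvFact (n - i) = pvNfac (n - i).toNat := by
    conv_lhs => rw [← Int.toNat_of_nonneg hni]
    exact pvFact_natCast (n - i).toNat
  have hsplit : pvNfac n.toNat = pvPprod n i.toNat * pvNfac (n - i).toNat := by
    have := pvFact_split i.toNat n (by rw [hcast]; exact h1)
    rwa [hcast] at this
  have hpos : 0 < pvNfac (n - i).toNat := pvNfac_pos _
  rw [hfn, hfni, hsplit, PySem.Int.floordiv_eq_ediv_of_pos hpos,
    Int.mul_ediv_cancel _ (ne_of_gt hpos)]

theorem pv_foldB (k : Nat) (n : Int) :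
    (PySem.List.pyRange 0 (k : Int) 1).foldl
      (fun (st : Int × Int) i => (st.1 + st.2, st.2 * (n - i))) (0, 1)
      = (pvSsum n k, pvPprod n k) := by
  induction k with
  | zero => rw [PySem.List.pyRange_one_eq_nil (by omega)]; simp [pvSsum, pvPprod]
  | succ k ih =>
      have hc : ((k + 1 : Nat) : Int) = (k : Int) + 1 := by push_cast; ring
      rw [hc, PySem.List.pyRange_one_succ_right (by positivity), List.foldl_append, ih]
      simp [pvSsum, pvPprod]

theorem pv_foldA (k : Nat) (n : Int) (hk : (k : Int) ≤ n + 1) :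
    (PySem.List.pyRange 0 (k : Int) 1).foldl
      (fun result i =>
        if i = 0 then result + 1
        else result + PySem.Int.floordiv (pvFact n) (pvFact (n - i))) 0
      = pvSsum n k := by
  induction k with
  | zero => rw [PySem.List.pyRange_one_eq_nil (by omega)]; simp [pvSsum]
  | succ k ih =>
      have hc : ((k + 1 : Nat) : Int) = (k : Int) + 1 := by push_cast; ring
      have hk' : (k : Int) ≤ n + 1 := by omega
      rw [hc, PySem.List.pyRange_one_succ_right (by positivity), List.foldl_append, ih hk']
      by_cases hk0 : (k : Int) = 0
      · have : k = 0 := by omega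
        subst this
        simp [pvSsum, pvPprod]
      · have h1 : 1 ≤ (k : Int) := by omega
        have h2 : (k : Int) ≤ n := by push_cast at hk; omega
        have hdiv := pv_div_term n (k : Int) h1 h2
        simp only [List.foldl_cons, List.foldl_nil, if_neg hk0, hdiv]
        have : ((k : Int)).toNat = k := by omega
        rw [this]
        simp [pvSsum]

-- ===== VERDICT (by name: the statement is the Claim_ definition above) =====
theorem number_of_seq_spec : Claim_equal_number_of_seq := by
  intro n _
  unfold Spec_number_of_seq number_of_seq number_of_seq_alt
  by_cases hn : 0 ≤ n
  · have hc : n + 1 = (((n + 1).toNat : Nat) : Int) := by omega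
    rw [hc, pv_foldA _ n (by omega), pv_foldB]
  · rw [PySem.List.pyRange_one_eq_nil (by omega)]
    simp
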